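-- pv_equiv track=rewrite | github.com/awais2001-bit/LEETCODE-EASY-ARRAY-PROBLEMS | strictly_increasing.py | can_be_increasing
-- ===== SOURCE A (Python) =====
-- def can_be_increasing(nums):
--     for i in range(len(nums)):
--         result = True
--         answer = nums[:i] + nums[i+1:]
--         for j in range(len(answer)-1):
--             if answer[j] >= answer[j+1]:
--                 result = False
--         if result:
--             return True
--     return False
-- ===== SOURCE B (Python) =====
-- def strictly_inc(arr):
--     return all(arr[k] < arr[k + 1] for k in range(len(arr) - 1))
--
-- def can_be_increasing(nums):
--     # One linear pass: find the first adjacent violation; only removing one of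
--     # its two endpoints can possibly help, so test just those two removals.
--     if not nums:
--         return False
--     n = len(nums)
--     i = 0
--     while i < n - 1 and nums[i] < nums[i + 1]:
--         i += 1
--     if i == n - 1:
--         return True
--     return strictly_inc(nums[:i] + nums[i + 1:]) or strictly_inc(nums[:i + 1] + nums[i + 2:])
-- ===== Notes on version B (the rewrite author's own statement) =====
-- stated objective: faster
-- what changed: Instead of trying every index and re-scanning the whole remainder (quadratic), B scans once for the first adjacent violation and checks only the two removals that could repair it.
import Mathlib
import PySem

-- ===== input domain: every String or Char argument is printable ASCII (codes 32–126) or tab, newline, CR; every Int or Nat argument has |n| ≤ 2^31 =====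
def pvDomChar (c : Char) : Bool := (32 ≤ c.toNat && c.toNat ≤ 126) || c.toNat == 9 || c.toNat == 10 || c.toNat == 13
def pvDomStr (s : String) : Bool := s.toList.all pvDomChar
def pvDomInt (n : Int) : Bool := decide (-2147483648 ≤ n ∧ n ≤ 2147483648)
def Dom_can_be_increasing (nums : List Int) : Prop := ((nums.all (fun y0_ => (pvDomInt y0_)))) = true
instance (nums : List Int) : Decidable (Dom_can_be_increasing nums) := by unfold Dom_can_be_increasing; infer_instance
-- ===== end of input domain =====

-- B replaces A's try-every-index removal scan by one pass that locates the first
-- adjacent violation and tests only the two removals that could repair it (faster).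


-- ===== PORT A =====
-- inner loop: `for j in range(len(answer)-1): if answer[j] >= answer[j+1]: result = False`
-- (indices j, j+1 are always in range, so getD is exact for Python's answer[j])
def pvInnerA (answer : List Int) : Bool :=
  (List.range (answer.length - 1)).foldl
    (fun result j => if answer.getD j 0 ≥ answer.getD (j + 1) 0 then false else result) true

-- outer loop with early `return True`; `answer = nums[:i] + nums[i+1:]` (i ≥ 0, so the
-- slices are exactly take/drop)
def pvLoopA (nums : List Int) : List Nat → Bool
  | [] => false
  | i :: rest =>
    if pvInnerA (nums.take i ++ nums.drop (i + 1)) then true else pvLoopA nums rest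

def can_be_increasing (nums : List Int) : Bool :=
  pvLoopA nums (List.range nums.length)

-- ===== PORT B =====
-- strictly_inc(arr) = all(arr[k] < arr[k+1] for k in range(len(arr)-1))
def pvStrictlyInc (arr : List Int) : Bool :=
  (List.range (arr.length - 1)).all (fun k => arr.getD k 0 < arr.getD (k + 1) 0)

-- `while i < n - 1 and nums[i] < nums[i+1]: i += 1` (in-range indices, getD exact)
def pvFind (nums : List Int) (i : Nat) : Nat :=
  if h : i < nums.length - 1 ∧ nums.getD i 0 < nums.getD (i + 1) 0 then pvFind nums (i + 1)
  else i
termination_by nums.length - 1 - i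

def can_be_increasing_alt (nums : List Int) : Bool :=
  if nums = [] then false
  else
    let n := nums.length
    let i := pvFind nums 0
    if i = n - 1 then true
    else
      pvStrictlyInc (nums.take i ++ nums.drop (i + 1)) ||
        pvStrictlyInc (nums.take (i + 1) ++ nums.drop (i + 2))

-- ===== PRECONDITION & SPEC =====
def Spec_can_be_increasing (nums : List Int) (out : Bool) : Prop := out = can_be_increasing_alt nums
instance (nums : List Int) (out : Bool) : Decidable (Spec_can_be_increasing nums out) := by unfold Spec_can_be_increasing; infer_instance

-- ===== CLAIM (what is proved, stated in full; the proofs are below) =====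
def Claim_equal_can_be_increasing : Prop := ∀ (nums : List Int), Dom_can_be_increasing nums → Spec_can_be_increasing nums (can_be_increasing nums)

-- ===== LEMMAS AND PROOFS =====

-- A's flag-carrying inner fold is the `all` of the pairwise conditions.
theorem pvInnerA_foldl (l : List Int) (js : List Nat) (b : Bool) :
    js.foldl (fun result j => if l.getD j 0 ≥ l.getD (j + 1) 0 then false else result) b
      = (b && js.all (fun j => decide (l.getD j 0 < l.getD (j + 1) 0))) := by
  induction js generalizing b with
  | nil => simp
  | cons x xs ih =>
    rw [List.foldl_cons, List.all_cons]
    by_cases h : l.getD x 0 ≥ l.getD (x + 1) 0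
    · rw [if_pos h, ih]
      simp only [decide_eq_false (not_lt.2 h), Bool.false_and, Bool.and_false]
    · rw [if_neg h, ih]
      simp only [decide_eq_true (not_le.mp h), Bool.true_and]

theorem pvInnerA_eq (l : List Int) : pvInnerA l = pvStrictlyInc l := by
  unfold pvInnerA pvStrictlyInc
  rw [pvInnerA_foldl, Bool.true_and]

-- A's early-return outer loop is an `any` over the index list.
theorem pvLoopA_any (nums : List Int) (idxs : List Nat) :
    pvLoopA nums idxs
      = idxs.any (fun i => pvStrictlyInc (nums.take i ++ nums.drop (i + 1))) := by
  induction idxs with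
  | nil => rfl
  | cons i rest ih =>
    simp only [pvLoopA, pvInnerA_eq, ih, List.any_cons]
    cases hS : pvStrictlyInc (nums.take i ++ nums.drop (i + 1)) <;> simp_all

-- removing index i, written the ports' way, is eraseIdx
theorem removeAt_eq (l : List Int) (i : Nat) : l.take i ++ l.drop (i + 1) = l.eraseIdx i := by
  induction l generalizing i with
  | nil => simp
  | cons a t ih =>
    cases i with
    | zero => simp [List.eraseIdx]
    | succ n => simp [List.eraseIdx, ih]

theorem strictlyInc_iff (l : List Int) :
    pvStrictlyInc l = true ↔ ∀ k, k + 1 < l.length → l.getD k 0 < l.getD (k + 1) 0 := by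
  simp only [pvStrictlyInc, List.all_eq_true, List.mem_range, decide_eq_true_eq]
  constructor <;> intro h k hk <;> exact h k (by omega)

theorem getD_eraseIdx (l : List Int) (i k : Nat) (_hki : k + 1 ≤ i ∨ i + 1 ≤ k + 1) :
    (l.eraseIdx i).getD k 0 = if k < i then l.getD k 0 else l.getD (k + 1) 0 := by
  simp only [List.getD_eq_getElem?_getD, List.getElem?_eraseIdx]
  split_ifs <;> simp_all

theorem length_eraseIdx_lt (l : List Int) (i : Nat) (h : i < l.length) :
    (l.eraseIdx i).length = l.length - 1 := by
  rw [List.length_eraseIdx]; simp [h]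

-- pvFind stays within n-1 when started there
theorem pvFind_le (nums : List Int) (i : Nat) (h : i ≤ nums.length - 1) :
    pvFind nums i ≤ nums.length - 1 := by
  fun_induction pvFind nums i with
  | case1 i h1 ih => exact ih (by omega)
  | case2 i h1 => omega

-- where pvFind stops short of n-1, the pair there violates
theorem pvFind_stop (nums : List Int) (i : Nat) (h : pvFind nums i < nums.length - 1) :
    ¬ nums.getD (pvFind nums i) 0 < nums.getD (pvFind nums i + 1) 0 := by
  fun_induction pvFind nums i with
  | case1 i h1 ih => exact ih h
  | case2 i h1 => intro hc; exact h1 ⟨h, hc⟩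

-- every pair strictly before the stopping point is increasing
theorem pvFind_min (nums : List Int) (i : Nat) :
    ∀ k, i ≤ k → k < pvFind nums i → nums.getD k 0 < nums.getD (k + 1) 0 := by
  fun_induction pvFind nums i with
  | case1 i h1 ih =>
    intro k hik hk
    rcases Nat.eq_or_lt_of_le hik with rfl | hlt
    · exact h1.2
    · exact ih k hlt hk
  | case2 i h1 => intro k hik hk; omega

-- a list with every adjacent pair increasing stays so after erasing index j
theorem inc_erase_of_inc (nums : List Int) (j : Nat)
    (hinc : ∀ k, k + 1 < nums.length → nums.getD k 0 < nums.getD (k + 1) 0) :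
    pvStrictlyInc (nums.eraseIdx j) = true := by
  rw [strictlyInc_iff]
  intro k hk
  by_cases hj : j < nums.length
  · rw [length_eraseIdx_lt _ _ hj] at hk
    rw [getD_eraseIdx _ _ _ (by omega), getD_eraseIdx _ _ _ (by omega)]
    split_ifs with h1 h2 h2
    · exact hinc k (by omega)
    · have hkj : k + 1 = j := by omega
      calc nums.getD k 0 < nums.getD (k + 1) 0 := hinc k (by omega)
        _ < nums.getD (k + 2) 0 := hinc (k + 1) (by omega)
    · omega
    · exact hinc (k + 1) (by omega)
  · rw [List.eraseIdx_of_length_le (by omega)] at hk ⊢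
    exact hinc k hk

-- erasing an index away from a violating adjacent pair keeps a violation
theorem not_inc_erase (nums : List Int) (i j : Nat) (hi : i + 1 < nums.length)
    (hv : ¬ nums.getD i 0 < nums.getD (i + 1) 0) (hj : j ≠ i ∧ j ≠ i + 1) :
    pvStrictlyInc (nums.eraseIdx j) = false := by
  by_cases hjn : j < nums.length
  · rw [Bool.eq_false_iff, Ne, strictlyInc_iff]
    intro h
    rcases Nat.lt_or_ge j i with hji | hji
    · -- j < i : pair sits at (i-1, i) in the erased list
      have hk := h (i - 1) (by rw [length_eraseIdx_lt _ _ hjn]; omega)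
      rw [getD_eraseIdx _ _ _ (by omega), getD_eraseIdx _ _ _ (by omega)] at hk
      rw [if_neg (by omega), if_neg (by omega)] at hk
      have e1 : i - 1 + 1 = i := by omega
      rw [e1] at hk
      exact hv hk
    · -- j > i+1 : pair still at (i, i+1)
      have hji2 : i + 1 < j := by omega
      have hk := h i (by rw [length_eraseIdx_lt _ _ hjn]; omega)
      rw [getD_eraseIdx _ _ _ (by omega), getD_eraseIdx _ _ _ (by omega)] at hk
      rw [if_pos (by omega), if_pos (by omega)] at hk
      exact hv hk
  · rw [List.eraseIdx_of_length_le (by omega), Bool.eq_false_iff, Ne, strictlyInc_iff]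
    intro h
    exact hv (h i hi)

-- ===== VERDICT (by name: the statement is the Claim_ definition above) =====
theorem can_be_increasing_spec : Claim_equal_can_be_increasing := by
  intro nums _
  unfold Spec_can_be_increasing can_be_increasing can_be_increasing_alt
  rw [pvLoopA_any]
  by_cases hnil : nums = []
  · subst hnil; simp
  · rw [if_neg hnil]
    have hn : 0 < nums.length := List.length_pos_iff.2 hnil
    set n := nums.length with hndef
    set i := pvFind nums 0 with hidef
    have hile : i ≤ n - 1 := pvFind_le nums 0 (by omega)
    have hmin : ∀ k, k < i → nums.getD k 0 < nums.getD (k + 1) 0 :=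
      fun k hk => pvFind_min nums 0 k (Nat.zero_le k) hk
    by_cases hend : i = n - 1
    · rw [if_pos hend]
      -- nums is strictly increasing everywhere, so removing index 0 works
      have hinc : ∀ k, k + 1 < n → nums.getD k 0 < nums.getD (k + 1) 0 := by
        intro k hk; exact hmin k (by omega)
      rw [List.any_eq_true]
      exact ⟨0, List.mem_range.2 hn, by rw [removeAt_eq]; exact inc_erase_of_inc nums 0 hinc⟩
    · rw [if_neg hend]
      have hilt : i < n - 1 := by omega
      have hv : ¬ nums.getD i 0 < nums.getD (i + 1) 0 := pvFind_stop nums 0 hilt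
      rw [removeAt_eq, removeAt_eq]
      -- any over range n equals the two candidate checks
      cases h1 : pvStrictlyInc (nums.eraseIdx i) with
      | true =>
        rw [Bool.true_or, List.any_eq_true]
        exact ⟨i, List.mem_range.2 (by omega), by rw [removeAt_eq]; exact h1⟩
      | false =>
        cases h2 : pvStrictlyInc (nums.eraseIdx (i + 1)) with
        | true =>
          rw [Bool.false_or, List.any_eq_true]
          exact ⟨i + 1, List.mem_range.2 (by omega), by rw [removeAt_eq]; exact h2⟩
        | false =>
          rw [Bool.false_or, List.any_eq_false]
          intro j hj
          rw [removeAt_eq]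
          by_cases hji : j = i
          · subst hji; simp [h1]
          · by_cases hji1 : j = i + 1
            · subst hji1; simp [h2]
            · simp [not_inc_erase nums i j (by omega) hv ⟨hji, hji1⟩]
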